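-- pv_equiv track=rewrite | github.com/lukakakakakak/Sexto | cadenas.py | calcular_suma_maxima
-- ===== SOURCE A (Python) =====
-- def calcular_suma_maxima(a, memo):
--     if a in memo:
--         return memo[a]
--
--
--     max_suma = a
--     divisor = a // 2
--
--
--     while divisor >= 1:
--         if a % divisor == 0:
--             max_suma = max(max_suma, a + calcular_suma_maxima(divisor, memo))
--             break
--         divisor -= 1
--
--     memo[a] = max_suma
--     return memo[a]
-- ===== SOURCE B (Python) =====
-- def _spf(x):
--     # smallest factor >= 2 of x by trial division up to sqrt(x); x itself if none (x prime)
--     i = 2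
--     while i * i <= x:
--         if x % i == 0:
--             return i
--         i += 1
--     return x
--
--
-- def calcular_suma_maxima(a, memo):
--     # iterative: descend the divisor chain with an explicit stack, then fold back up
--     chain = []
--     x = a
--     while x not in memo and x >= 2:
--         chain.append(x)
--         x = x // _spf(x)   # largest proper divisor
--     if x in memo:
--         s = memo[x]
--     else:
--         s = x
--         memo[x] = s
--     for y in reversed(chain):
--         s = max(y, y + s)
--         memo[y] = s
--     return s
-- ===== Notes on version B (the rewrite author's own statement) =====
-- stated objective: alternative
-- what changed: A recursively scans candidate divisors downward from a//2 until one divides a; B is iterative: it descends the divisor chain with an explicit stack, computing each step's largest proper divisor as a//spf(a) with spf found by trial division up to sqrt(a), then folds the sums back up the stack (O(sqrt(a)) worst case per value vs A's O(a); measured times on generated inputs are on par).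
import Mathlib
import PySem

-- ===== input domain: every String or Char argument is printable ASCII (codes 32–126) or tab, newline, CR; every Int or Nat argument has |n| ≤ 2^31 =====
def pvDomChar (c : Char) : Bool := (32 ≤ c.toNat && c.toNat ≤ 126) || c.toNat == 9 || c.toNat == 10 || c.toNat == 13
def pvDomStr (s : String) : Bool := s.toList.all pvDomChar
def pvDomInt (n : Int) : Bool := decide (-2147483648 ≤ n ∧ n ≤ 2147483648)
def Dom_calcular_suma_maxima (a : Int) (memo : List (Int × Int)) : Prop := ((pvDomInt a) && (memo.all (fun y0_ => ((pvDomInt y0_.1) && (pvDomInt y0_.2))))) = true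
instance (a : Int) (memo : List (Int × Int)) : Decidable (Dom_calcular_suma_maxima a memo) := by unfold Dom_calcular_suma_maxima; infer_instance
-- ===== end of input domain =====

-- A is a memoized recursion scanning divisors downward from a//2; B is an iterative two-phase
-- algorithm: descend the divisor chain with an explicit stack (largest proper divisor = a // spf(a),
-- spf by trial division up to √a), then fold the sums back up — a different decomposition, same result.
-- Both Pythons write the computed values into memo (the same entries in the same order); the
-- equivalence proved here is about the RETURN value, the memo mutation is not modelled.
-- Both ports express their loop/recursion with a fuel parameter (a.toNat + 1 at the top call, enough
-- for the strictly decreasing chain of divisors); the fuel-0 branches are unreachable from the top call.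

-- ===== PORT A =====
-- A's while loop: scan divisor d downward, first divisor ≥ 1 of a (none when the loop ends)
def pvFindDiv (fuel : Nat) (a d : Int) : Option Int :=
  match fuel with
  | 0 => none
  | fuel + 1 =>
    if 1 ≤ d then
      if PySem.Int.mod a d = 0 then some d else pvFindDiv fuel a (d - 1)
    else none

def pvCalcA (fuel : Nat) (a : Int) (memo : List (Int × Int)) : Int :=
  match fuel with
  | 0 => 0
  | fuel + 1 =>
    match memo.lookup a with
    | some v => v
    | none =>
      match pvFindDiv (PySem.Int.floordiv a 2).toNat a (PySem.Int.floordiv a 2) with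
      | some d => max a (a + pvCalcA fuel d memo)
      | none => a

def calcular_suma_maxima (a : Int) (memo : List (Int × Int)) : Int :=
  pvCalcA (a.toNat + 1) a memo

-- ===== PORT B =====
-- _spf's while loop: scan i upward while i*i ≤ x, early-return of the first i with x % i == 0
def pvSpf (fuel : Nat) (x i : Int) : Option Int :=
  match fuel with
  | 0 => none
  | fuel + 1 =>
    if i * i ≤ x then
      if PySem.Int.mod x i = 0 then some i else pvSpf fuel x (i + 1)
    else none

-- _spf: smallest factor of x (x itself when the scan finds nothing, i.e. x prime)
def pvSpfOf (x : Int) : Int := (pvSpf x.toNat x 2).getD x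

-- B's first while loop: push the chain onto a stack (cons = Python's append + the later reversed)
-- and return it together with the base value s of the second phase
def pvDescend (fuel : Nat) (x : Int) (memo : List (Int × Int)) (chain : List Int) :
    List Int × Int :=
  match fuel with
  | 0 => (chain, x)
  | fuel + 1 =>
    if (memo.lookup x).isNone ∧ 2 ≤ x then
      pvDescend fuel (PySem.Int.floordiv x (pvSpfOf x)) memo (x :: chain)
    else
      (chain, match memo.lookup x with | some v => v | none => x)

-- B's second phase: fold the sums back up the stack
def calcular_suma_maxima_alt (a : Int) (memo : List (Int × Int)) : Int :=
  let r := pvDescend (a.toNat + 1) a memo []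
  r.1.foldl (fun s y => max y (y + s)) r.2

-- ===== PRECONDITION & SPEC =====
def Spec_calcular_suma_maxima (a : Int) (memo : List (Int × Int)) (out : Int) : Prop := out = calcular_suma_maxima_alt a memo
instance (a : Int) (memo : List (Int × Int)) (out : Int) : Decidable (Spec_calcular_suma_maxima a memo out) := by unfold Spec_calcular_suma_maxima; infer_instance

-- ===== CLAIM (what is proved, stated in full; the proofs are below) =====
def Claim_equal_calcular_suma_maxima : Prop := ∀ (a : Int) (memo : List (Int × Int)), Dom_calcular_suma_maxima a memo → Spec_calcular_suma_maxima a memo (calcular_suma_maxima a memo)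

-- ===== LEMMAS AND PROOFS =====

theorem pvSpf_some (fuel : Nat) (a i p : Int) (h : pvSpf fuel a i = some p) :
    i ≤ p ∧ p * p ≤ a ∧ PySem.Int.mod a p = 0 := by
  induction fuel generalizing i with
  | zero => simp [pvSpf] at h
  | succ fuel ih =>
    unfold pvSpf at h
    by_cases hsq : i * i ≤ a
    · rw [if_pos hsq] at h
      by_cases hm : PySem.Int.mod a i = 0
      · rw [if_pos hm] at h; cases h; exact ⟨le_refl _, hsq, hm⟩
      · rw [if_neg hm] at h
        have := ih (i + 1) h
        exact ⟨by omega, this.2.1, this.2.2⟩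
    · rw [if_neg hsq] at h; cases h

-- if the scan of _spf returned some p, no j with i ≤ j < p divides a
theorem pvSpf_some_min (fuel : Nat) (a i p : Int) (h : pvSpf fuel a i = some p) :
    ∀ j, i ≤ j → j < p → ¬ PySem.Int.mod a j = 0 := by
  induction fuel generalizing i with
  | zero => simp [pvSpf] at h
  | succ fuel ih =>
    intro j hij hjp
    unfold pvSpf at h
    by_cases hsq : i * i ≤ a
    · rw [if_pos hsq] at h
      by_cases hm : PySem.Int.mod a i = 0
      · rw [if_pos hm] at h; cases h; omega
      · rw [if_neg hm] at h
        by_cases hji : j = i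
        · subst hji; exact hm
        · exact ih (i + 1) h j (by omega) hjp
    · rw [if_neg hsq] at h; cases h

-- if the scan of _spf (with enough fuel) returned none, no j ≥ i with j*j ≤ a divides a
theorem pvSpf_none (fuel : Nat) (a i : Int) (hi0 : 0 ≤ i) (hfuel : a < i + fuel)
    (h : pvSpf fuel a i = none) :
    ∀ j, i ≤ j → j * j ≤ a → ¬ PySem.Int.mod a j = 0 := by
  induction fuel generalizing i with
  | zero =>
    intro j hij hjsq _
    have h0 : 0 ≤ j * j := mul_self_nonneg j
    have hj1 : 1 ≤ j := by omega
    have hjj : j ≤ j * j := le_mul_of_one_le_left (by omega) hj1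
    push_cast at hfuel
    linarith
  | succ fuel ih =>
    intro j hij hjsq hjm
    unfold pvSpf at h
    by_cases hsq : i * i ≤ a
    · rw [if_pos hsq] at h
      by_cases hm : PySem.Int.mod a i = 0
      · rw [if_pos hm] at h; cases h
      · rw [if_neg hm] at h
        by_cases hji : j = i
        · subst hji; exact hm hjm
        · exact ih (i + 1) (by omega) (by omega) h j (by omega) hjsq hjm
    · exfalso
      have : i * i ≤ j * j := mul_le_mul hij hij hi0 (by omega)
      omega

theorem pvSpfOf_spec (a : Int) (h2 : 2 ≤ a) : 2 ≤ pvSpfOf a ∧ pvSpfOf a ∣ a := by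
  unfold pvSpfOf
  cases hs : pvSpf a.toNat a 2 with
  | none => exact ⟨h2, dvd_refl a⟩
  | some p =>
    have hp := pvSpf_some a.toNat a 2 p hs
    exact ⟨hp.1, (PySem.Int.mod_eq_zero_iff_dvd a p).mp hp.2.2⟩

-- pvSpfOf a is the SMALLEST divisor ≥ 2 of a (for a ≥ 2)
theorem pvSpfOf_min (a : Int) (h2 : 2 ≤ a) :
    ∀ q, 2 ≤ q → q < pvSpfOf a → ¬ q ∣ a := by
  intro q hq2 hqlt hqdvd
  unfold pvSpfOf at hqlt
  cases hs : pvSpf a.toNat a 2 with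
  | some p =>
    rw [hs] at hqlt
    simp only [Option.getD_some] at hqlt
    exact pvSpf_some_min a.toNat a 2 p hs q hq2 hqlt
      ((PySem.Int.mod_eq_zero_iff_dvd a q).mpr hqdvd)
  | none =>
    rw [hs] at hqlt
    simp only [Option.getD_none] at hqlt
    -- q ∣ a, 2 ≤ q < a; the cofactor r = a/q also divides, min(q,r)² ≤ a contradicts the empty scan
    have hfuel : a < 2 + (a.toNat : Int) := by omega
    have hr : q * (a / q) = a := Int.mul_ediv_cancel' hqdvd
    set r := a / q with hrdef
    have hr1 : 1 ≤ r := by nlinarith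
    have hr2 : 2 ≤ r := by
      by_cases h : 2 ≤ r
      · exact h
      · exfalso
        have : r = 1 := by omega
        rw [this] at hr; omega
    have hrdvd : r ∣ a := ⟨q, by rw [← hr]; ring⟩
    rcases le_total q r with hqr | hqr
    · exact pvSpf_none a.toNat a 2 (by omega) hfuel hs q hq2 (by nlinarith)
        ((PySem.Int.mod_eq_zero_iff_dvd a q).mpr hqdvd)
    · exact pvSpf_none a.toNat a 2 (by omega) hfuel hs r hr2 (by nlinarith)
        ((PySem.Int.mod_eq_zero_iff_dvd a r).mpr hrdvd)

theorem pvSpfOf_div_bounds (a : Int) (h2 : 2 ≤ a) :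
    1 ≤ PySem.Int.floordiv a (pvSpfOf a) ∧ 2 * PySem.Int.floordiv a (pvSpfOf a) ≤ a := by
  obtain ⟨hp2, hdvd⟩ := pvSpfOf_spec a h2
  rw [PySem.Int.floordiv_eq_ediv_of_pos (by omega : (0:Int) < pvSpfOf a)]
  have hmul : pvSpfOf a * (a / pvSpfOf a) = a := Int.mul_ediv_cancel' hdvd
  constructor
  · nlinarith [hmul]
  · nlinarith [hmul]

-- a // (spf a) is the LARGEST divisor of a with twice it ≤ a (for a ≥ 2)
theorem pvSpfOf_div_max (a e : Int) (h2 : 2 ≤ a) (he : e ∣ a)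
    (hgt : PySem.Int.floordiv a (pvSpfOf a) < e) (hle : 2 * e ≤ a) : False := by
  obtain ⟨hp2, hpdvd⟩ := pvSpfOf_spec a h2
  set p := pvSpfOf a with hpdef
  rw [PySem.Int.floordiv_eq_ediv_of_pos (by omega : (0:Int) < p)] at hgt
  set d := a / p with hddef
  have hpd : p * d = a := Int.mul_ediv_cancel' hpdvd
  have her : e * (a / e) = a := Int.mul_ediv_cancel' he
  set r := a / e with hrdef
  have he1 : 1 ≤ e := by nlinarith
  have hr2 : 2 ≤ r := by nlinarith
  have hrdvd : r ∣ a := ⟨e, by rw [← her]; ring⟩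
  have hrp : r < p := by nlinarith
  exact pvSpfOf_min a h2 r hr2 hrp hrdvd

-- A's downward scan (with enough fuel) returns some d when d divides a, 1 ≤ d ≤ d0 and
-- nothing larger ≤ d0 divides a
theorem pvFindDiv_finds (fuel : Nat) (a d d0 : Int) (hd1 : 1 ≤ d) (hdvd : d ∣ a)
    (hle : d ≤ d0) (hfuel : d0 < d + fuel)
    (hmax : ∀ e, d < e → e ≤ d0 → ¬ e ∣ a) : pvFindDiv fuel a d0 = some d := by
  induction fuel generalizing d0 with
  | zero => omega
  | succ fuel ih =>
    by_cases heq : d0 = d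
    · subst heq
      unfold pvFindDiv
      rw [if_pos hd1, if_pos ((PySem.Int.mod_eq_zero_iff_dvd a d0).mpr hdvd)]
    · have hlt : d < d0 := by omega
      unfold pvFindDiv
      rw [if_pos (by omega : (1:Int) ≤ d0)]
      have hm : ¬ PySem.Int.mod a d0 = 0 := fun h =>
        hmax d0 hlt le_rfl ((PySem.Int.mod_eq_zero_iff_dvd a d0).mp h)
      rw [if_neg hm]
      exact ih (d0 - 1) (by omega) (by omega) (fun e h1 h2 => hmax e h1 (by omega))

-- KEY: A's scan from a//2 finds exactly a // (spf a)
theorem pvFindDiv_eq_spf (a : Int) (h2 : 2 ≤ a) :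
    pvFindDiv (PySem.Int.floordiv a 2).toNat a (PySem.Int.floordiv a 2)
      = some (PySem.Int.floordiv a (pvSpfOf a)) := by
  obtain ⟨hd1, hd2⟩ := pvSpfOf_div_bounds a h2
  obtain ⟨hp2, hpdvd⟩ := pvSpfOf_spec a h2
  have hddvd : PySem.Int.floordiv a (pvSpfOf a) ∣ a := by
    rw [PySem.Int.floordiv_eq_ediv_of_pos (by omega : (0:Int) < pvSpfOf a)]
    exact Int.ediv_dvd_of_dvd hpdvd
  have hfd2 : PySem.Int.floordiv a 2 = a / 2 :=
    PySem.Int.floordiv_eq_ediv_of_pos (by omega : (0:Int) < 2)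
  apply pvFindDiv_finds _ a _ _ hd1 hddvd
  · rw [hfd2]; omega
  · rw [hfd2]; omega
  · intro e hgt hle hedvd
    rw [hfd2] at hle
    exact pvSpfOf_div_max a e h2 hedvd hgt (by omega)

-- MAIN INVARIANT: folding B's stack onto its base value computes A's recursion, the pending
-- outer frames being exactly the stack contents
theorem pvDescend_foldl (fuel : Nat) (x : Int) (memo : List (Int × Int)) (chain : List Int)
    (hfuel : x.toNat < fuel) :
    ((pvDescend fuel x memo chain).1).foldl (fun s y => max y (y + s))
      (pvDescend fuel x memo chain).2
    = chain.foldl (fun s y => max y (y + s)) (pvCalcA fuel x memo) := by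
  induction fuel generalizing x chain with
  | zero => omega
  | succ fuel ih =>
    unfold pvDescend pvCalcA
    cases hm : memo.lookup x with
    | some v =>
      rw [if_neg (by simp)]
    | none =>
      by_cases h2 : 2 ≤ x
      · rw [if_pos ⟨by simp, h2⟩]
        have hb := pvSpfOf_div_bounds x h2
        rw [ih (PySem.Int.floordiv x (pvSpfOf x)) (x :: chain) (by omega)]
        rw [pvFindDiv_eq_spf x h2]
        simp [List.foldl]
      · rw [if_neg (by intro h; exact h2 h.2)]
        have hnone : pvFindDiv (PySem.Int.floordiv x 2).toNat x (PySem.Int.floordiv x 2) = none := by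
          have hfd2 : PySem.Int.floordiv x 2 = x / 2 :=
            PySem.Int.floordiv_eq_ediv_of_pos (by omega : (0:Int) < 2)
          have : (PySem.Int.floordiv x 2).toNat = 0 := by rw [hfd2]; omega
          rw [this]; rfl
        rw [hnone]

-- ===== VERDICT (by name: the statement is the Claim_ definition above) =====
theorem calcular_suma_maxima_spec : Claim_equal_calcular_suma_maxima := by
  intro a memo _
  unfold Spec_calcular_suma_maxima calcular_suma_maxima calcular_suma_maxima_alt
  exact (pvDescend_foldl (a.toNat + 1) a memo [] (by omega)).symm
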